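-- pv_equiv track=rewrite | github.com/vindaloo95/MyFirstProject | prog4.py | ignore9
-- ===== SOURCE A (Python) =====
-- def ignore9(my_list):
--     sum = 0
--     skip = False
--     for i in my_list:
--         if i == 9:
--             skip = True
--         elif skip:
--             skip = False
--         else:
--             sum += i
--     return sum
-- ===== SOURCE B (Python) =====
-- def ignore9(my_list):
--     # lookback: include x when x != 9 and the previous element (None at the start) is not 9
--     return sum(x for prev, x in zip([None] + my_list, my_list) if x != 9 and prev != 9)
-- ===== Notes on version B (the rewrite author's own statement) =====
-- stated objective: idiomatic
-- what changed: Replaces the forward-threaded skip flag state machine with a single comprehension that sums each element whose predecessor (obtained by zipping the list with itself shifted by one) is not 9.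
import Mathlib
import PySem

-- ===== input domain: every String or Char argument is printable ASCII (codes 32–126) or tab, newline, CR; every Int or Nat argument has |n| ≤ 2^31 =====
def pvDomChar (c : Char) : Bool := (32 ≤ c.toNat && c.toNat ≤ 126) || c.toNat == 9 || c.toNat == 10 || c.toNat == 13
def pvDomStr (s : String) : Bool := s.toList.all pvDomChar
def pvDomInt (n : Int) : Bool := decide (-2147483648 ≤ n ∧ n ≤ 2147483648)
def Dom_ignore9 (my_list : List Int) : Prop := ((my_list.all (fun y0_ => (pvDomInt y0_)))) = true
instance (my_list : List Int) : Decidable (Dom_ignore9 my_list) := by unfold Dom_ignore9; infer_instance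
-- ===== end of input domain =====

-- ===== PORT A =====
-- sum = 0; skip = False; for i in my_list: if i==9: skip=True elif skip: skip=False else: sum+=i
def ignore9 (my_list : List Int) : Int :=
  (my_list.foldl (fun st i =>
      if i = 9 then (st.1, true)
      else if st.2 then (st.1, false)
      else (st.1 + i, st.2)) ((0 : Int), false)).1

-- ===== PORT B =====
-- B: sum(x for prev, x in zip([None] + my_list, my_list) if x != 9 and prev != 9)
def ignore9_alt (my_list : List Int) : Int :=
  (((((none : Option Int) :: my_list.map some).zip my_list).filter
      (fun p => p.2 != 9 && p.1 != some 9)).map (fun p => p.2)).foldl (· + ·) 0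

-- ===== PRECONDITION & SPEC =====
def Spec_ignore9 (my_list : List Int) (out : Int) : Prop := out = ignore9_alt my_list
instance (my_list : List Int) (out : Int) : Decidable (Spec_ignore9 my_list out) := by unfold Spec_ignore9; infer_instance

-- ===== CLAIM (what is proved, stated in full; the proofs are below) =====
def Claim_equal_ignore9 : Prop := ∀ (my_list : List Int), Dom_ignore9 my_list → Spec_ignore9 my_list (ignore9 my_list)

-- ===== LEMMAS AND PROOFS =====

-- canonical recursion: include x unless x = 9 or the previous element was 9
def goPrev : List Int → Bool → Int
  | [], _ => 0
  | x :: r, p => (if x = 9 ∨ p = true then 0 else x) + goPrev r (x = 9)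

theorem foldlA_eq (l : List Int) (s : Int) (p : Bool) :
    (l.foldl (fun st i =>
      if i = 9 then (st.1, true)
      else if st.2 then (st.1, false)
      else (st.1 + i, st.2)) (s, p)).1 = s + goPrev l p := by
  induction l generalizing s p with
  | nil => simp [goPrev]
  | cons x r ih =>
    by_cases hx : x = 9
    · simp [List.foldl, hx, ih, goPrev]
    · cases p <;> simp [List.foldl, hx, ih, goPrev]
      ring

theorem foldl_add_sum (L : List Int) (s : Int) :
    L.foldl (· + ·) s = s + L.sum := by
  induction L generalizing s with
  | nil => simp
  | cons x r ih => simp [List.foldl, ih]; ring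

theorem altB_eq (r : List Int) (p : Option Int) :
    ((((p :: r.map some).zip r).filter
        (fun q => q.2 != 9 && q.1 != some 9)).map (fun q => q.2)).sum
      = goPrev r (p = some 9) := by
  induction r generalizing p with
  | nil => simp [goPrev]
  | cons x r ih =>
    by_cases hx : x = 9 <;> by_cases hp : p = some 9 <;>
      simp [List.zip_cons_cons, List.filter_cons, goPrev, hx, hp, ih]

-- ===== VERDICT (by name: the statement is the Claim_ definition above) =====
theorem ignore9_spec : Claim_equal_ignore9 := by
  intro l _
  unfold Spec_ignore9 ignore9 ignore9_alt
  rw [foldlA_eq, foldl_add_sum, altB_eq]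
  simp
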